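-- pv_equiv track=rewrite | github.com/Nicholas-Arcari/soc-toolkit | backend/core/logs/web_analyzer.py | _get_suspicious_reasons
-- ===== SOURCE A (Python) =====
-- def _get_suspicious_reasons(entry: dict) -> list[str]:
--     """Get specific reasons why a request is suspicious."""
--     reasons = []
--     path = entry.get("path", "").lower()
--
--     if any(p in path for p in ["'", "union", "select", "1=1"]):
--         reasons.append("Possible SQL injection")
--     if "../" in path or "..%2f" in path:
--         reasons.append("Path traversal attempt")
--     if any(p in path for p in [";", "|", "`"]):
--         reasons.append("Possible command injection")
--     if any(path.startswith(p) for p in ["/admin", "/wp-admin", "/.env", "/.git"]):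
--         reasons.append("Sensitive path enumeration")
--
--     return reasons
-- ===== SOURCE B (Python) =====
-- _TOKEN_RULES = [
--     ("Possible SQL injection", ["'", "union", "select", "1=1"]),
--     ("Path traversal attempt", ["../", "..%2f"]),
--     ("Possible command injection", [";", "|", "`"]),
-- ]
--
-- _PREFIXES = ["/admin", "/wp-admin", "/.env", "/.git"]
--
--
-- def _get_suspicious_reasons(entry: dict) -> list[str]:
--     """Get specific reasons why a request is suspicious."""
--     path = entry.get("path", "").lower()
--     # Single left-to-right scan: at each position, record every rule one of
--     # whose tokens matches there, instead of one substring search per token.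
--     hit = set()
--     for i in range(len(path)):
--         for reason, tokens in _TOKEN_RULES:
--             if reason not in hit and any(path.startswith(t, i) for t in tokens):
--                 hit.add(reason)
--     reasons = [reason for reason, _ in _TOKEN_RULES if reason in hit]
--     if any(path.startswith(p) for p in _PREFIXES):
--         reasons.append("Sensitive path enumeration")
--     return reasons
-- ===== Notes on version B (the rewrite author's own statement) =====
-- stated objective: alternative
-- what changed: Replaced A's four independent substring searches with a single left-to-right scan over character positions that matches all injection/traversal tokens at each position and records hit rules in a set, then emits the recorded reasons in rule order (the prefix rule is checked at position 0 as before).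
import Mathlib
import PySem

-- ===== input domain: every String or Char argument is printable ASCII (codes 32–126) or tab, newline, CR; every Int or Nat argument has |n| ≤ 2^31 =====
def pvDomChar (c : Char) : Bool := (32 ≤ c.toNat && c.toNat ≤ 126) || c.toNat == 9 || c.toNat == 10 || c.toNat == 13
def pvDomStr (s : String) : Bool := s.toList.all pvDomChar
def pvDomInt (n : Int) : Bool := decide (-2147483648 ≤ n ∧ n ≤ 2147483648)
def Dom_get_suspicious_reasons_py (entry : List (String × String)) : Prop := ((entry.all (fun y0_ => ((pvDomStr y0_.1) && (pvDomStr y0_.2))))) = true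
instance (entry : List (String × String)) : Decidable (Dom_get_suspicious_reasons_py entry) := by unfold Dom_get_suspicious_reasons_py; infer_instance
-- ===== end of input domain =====

-- B replaces A's four independent substring searches by a single left-to-right scan
-- over character positions that matches all injection/traversal tokens at each
-- position, recording hit rules in a set (objective: alternative).

-- ===== PORT A =====
def get_suspicious_reasons_py (entry : List (String × String)) : List String :=
  let reasons : List String := []
  let path := PySem.Str.lower ((PySem.Dict.ofList entry).getD "path" "")
  let reasons := if ["'", "union", "select", "1=1"].any (fun p => PySem.Str.isIn p path)
                 then reasons ++ ["Possible SQL injection"] else reasons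
  let reasons := if PySem.Str.isIn "../" path || PySem.Str.isIn "..%2f" path
                 then reasons ++ ["Path traversal attempt"] else reasons
  let reasons := if [";", "|", "`"].any (fun p => PySem.Str.isIn p path)
                 then reasons ++ ["Possible command injection"] else reasons
  let reasons := if ["/admin", "/wp-admin", "/.env", "/.git"].any (fun p => PySem.Str.startswith path p)
                 then reasons ++ ["Sensitive path enumeration"] else reasons
  reasons

-- ===== PORT B =====
-- _TOKEN_RULES from Source B
def suspTokenRules : List (String × List String) :=
  [("Possible SQL injection", ["'", "union", "select", "1=1"]),
   ("Path traversal attempt", ["../", "..%2f"]),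
   ("Possible command injection", [";", "|", "`"])]

-- _PREFIXES from Source B
def suspPrefixes : List String := ["/admin", "/wp-admin", "/.env", "/.git"]

-- path.startswith(t, i): exact = token t matches the characters at offset i
def suspMatchAt (chars : List Char) (i : Nat) (t : String) : Bool :=
  t.toList.isPrefixOf (chars.drop i)

def get_suspicious_reasons_py_alt (entry : List (String × String)) : List String :=
  let path := PySem.Str.lower ((PySem.Dict.ofList entry).getD "path" "")
  let chars := path.toList
  let hit : PySem.Set String :=
    (List.range chars.length).foldl (fun hit i =>
      suspTokenRules.foldl (fun hit r =>
        if !(PySem.Set.contains hit r.1) && r.2.any (suspMatchAt chars i)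
        then PySem.Set.add hit r.1 else hit) hit) PySem.Set.empty
  let reasons := (suspTokenRules.filter (fun r => PySem.Set.contains hit r.1)).map Prod.fst
  if suspPrefixes.any (fun p => PySem.Str.startswith path p)
  then reasons ++ ["Sensitive path enumeration"] else reasons

-- ===== PRECONDITION & SPEC =====
def Spec_get_suspicious_reasons_py (entry : List (String × String)) (out : List String) : Prop := out = get_suspicious_reasons_py_alt entry
instance (entry : List (String × String)) (out : List String) : Decidable (Spec_get_suspicious_reasons_py entry out) := by unfold Spec_get_suspicious_reasons_py; infer_instance

-- ===== CLAIM (what is proved, stated in full; the proofs are below) =====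
def Claim_equal_get_suspicious_reasons_py : Prop := ∀ (entry : List (String × String)), Dom_get_suspicious_reasons_py entry → Spec_get_suspicious_reasons_py entry (get_suspicious_reasons_py entry)

-- ===== LEMMAS AND PROOFS =====

-- one rule step of the inner fold only adds that rule's reason
theorem susp_contains_step (hit : PySem.Set String) (r s : String) (q : Bool) :
    PySem.Set.contains (if !(PySem.Set.contains hit r) && q then PySem.Set.add hit r else hit) s
      = (PySem.Set.contains hit s || (q && (s == r))) := by
  cases q with
  | false => simp
  | true =>
    rw [Bool.eq_iff_iff]
    cases hc : PySem.Set.contains hit r with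
    | true =>
      have hm : r ∈ hit := by simpa [PySem.Set.contains, List.contains_iff_mem] using hc
      simp only [Bool.not_true, Bool.false_and, Bool.true_and, Bool.or_eq_true, beq_iff_eq]
      simp only [PySem.Set.contains, List.contains_iff_mem]
      all_goals exact ⟨Or.inl, fun h => h.elim id (fun e => e ▸ hm)⟩
    | false =>
      simp only [Bool.not_false, Bool.and_true, if_true, Bool.true_and, Bool.or_eq_true,
        beq_iff_eq]
      simp only [PySem.Set.contains, List.contains_iff_mem, PySem.Set.mem_add]

-- the inner fold over the three rules, characterised
theorem susp_inner (chars : List Char) (i : Nat) (hit : PySem.Set String) (s : String) :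
    PySem.Set.contains (suspTokenRules.foldl (fun hit r =>
        if !(PySem.Set.contains hit r.1) && r.2.any (suspMatchAt chars i)
        then PySem.Set.add hit r.1 else hit) hit) s
      = (PySem.Set.contains hit s
         || ((["'", "union", "select", "1=1"] : List String).any (suspMatchAt chars i) && (s == "Possible SQL injection"))
         || ((["../", "..%2f"] : List String).any (suspMatchAt chars i) && (s == "Path traversal attempt"))
         || (([";", "|", "`"] : List String).any (suspMatchAt chars i) && (s == "Possible command injection"))) := by
  simp only [suspTokenRules, List.foldl_cons, List.foldl_nil]
  rw [susp_contains_step, susp_contains_step, susp_contains_step]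

-- boolean bookkeeping for one step of the scan
theorem susp_bool_step (C x1 x2 x3 y1 y2 y3 e1 e2 e3 : Bool) :
    ((((((C || (x1 && e1)) || (x2 && e2)) || (x3 && e3)) || (y1 && e1)) || (y2 && e2)) || (y3 && e3))
      = (((C || ((x1 || y1) && e1)) || ((x2 || y2) && e2)) || ((x3 || y3) && e3)) := by
  revert C x1 x2 x3 y1 y2 y3 e1 e2 e3
  decide

-- the outer scan over the index list, characterised
theorem susp_scan (chars : List Char) (l : List Nat) (hit : PySem.Set String) (s : String) :
    PySem.Set.contains (l.foldl (fun hit i =>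
        suspTokenRules.foldl (fun hit r =>
          if !(PySem.Set.contains hit r.1) && r.2.any (suspMatchAt chars i)
          then PySem.Set.add hit r.1 else hit) hit) hit) s
      = (PySem.Set.contains hit s
         || (l.any (fun i => (["'", "union", "select", "1=1"] : List String).any (suspMatchAt chars i)) && (s == "Possible SQL injection"))
         || (l.any (fun i => (["../", "..%2f"] : List String).any (suspMatchAt chars i)) && (s == "Path traversal attempt"))
         || (l.any (fun i => ([";", "|", "`"] : List String).any (suspMatchAt chars i)) && (s == "Possible command injection"))) := by
  induction l generalizing hit with
  | nil => simp
  | cons i l ih =>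
    simp only [List.foldl_cons, ih, susp_inner, List.any_cons]
    exact susp_bool_step _ _ _ _ _ _ _ _ _ _

-- scanning every position finds one of the (nonempty) tokens iff one occurs as a substring
theorem susp_any_swap (toks : List String) (chars : List Char)
    (h : ∀ t ∈ toks, t.toList ≠ []) :
    (List.range chars.length).any (fun i => toks.any (suspMatchAt chars i))
      = toks.any (fun t => PySem.Chars.isIn t.toList chars) := by
  rw [Bool.eq_iff_iff]
  simp only [List.any_eq_true, List.mem_range, suspMatchAt, List.isPrefixOf_iff_prefix]
  constructor
  · rintro ⟨i, _, t, ht, hp⟩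
    exact ⟨t, ht, (PySem.Chars.exists_prefix_drop_iff_isIn t.toList chars).mp ⟨i, hp⟩⟩
  · rintro ⟨t, ht, hin⟩
    obtain ⟨j, hj⟩ := (PySem.Chars.exists_prefix_drop_iff_isIn t.toList chars).mpr hin
    refine ⟨j, ?_, t, ht, hj⟩
    by_contra hjn
    rw [List.drop_eq_nil_of_le (Nat.le_of_not_lt hjn)] at hj
    exact h t ht (List.prefix_nil.mp hj)

-- the three token lists of Source B, instantiated
theorem susp_swap_sql (chars : List Char) :
    (List.range chars.length).any (fun i => (["'", "union", "select", "1=1"] : List String).any (suspMatchAt chars i))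
      = (["'", "union", "select", "1=1"] : List String).any (fun t => PySem.Chars.isIn t.toList chars) :=
  susp_any_swap _ _ (by decide)

theorem susp_swap_trav (chars : List Char) :
    (List.range chars.length).any (fun i => (["../", "..%2f"] : List String).any (suspMatchAt chars i))
      = (["../", "..%2f"] : List String).any (fun t => PySem.Chars.isIn t.toList chars) :=
  susp_any_swap _ _ (by decide)

theorem susp_swap_cmd (chars : List Char) :
    (List.range chars.length).any (fun i => ([";", "|", "`"] : List String).any (suspMatchAt chars i))
      = ([";", "|", "`"] : List String).any (fun t => PySem.Chars.isIn t.toList chars) :=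
  susp_any_swap _ _ (by decide)

-- ===== VERDICT (by name: the statement is the Claim_ definition above) =====
set_option maxHeartbeats 1000000 in
theorem get_suspicious_reasons_py_spec : Claim_equal_get_suspicious_reasons_py := by
  intro entry _
  unfold Spec_get_suspicious_reasons_py
  simp only [get_suspicious_reasons_py, get_suspicious_reasons_py_alt]
  simp only [susp_scan]
  simp only [suspTokenRules, suspPrefixes, List.filter_cons, List.filter_nil,
    PySem.Set.contains, PySem.Set.empty, List.contains_nil, Bool.false_or,
    String.reduceBEq, beq_self_eq_true, Bool.and_true, Bool.and_false, Bool.or_false]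
  simp only [susp_swap_sql, susp_swap_trav, susp_swap_cmd]
  simp only [PySem.Str.isIn_eq, List.any_cons, List.any_nil, Bool.or_false]
  split_ifs <;> rfl
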